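-- pv_equiv track=rewrite | github.com/papanokechi/wallis-pcf-lean4 | relay_round10_master.py | compute_pk
-- ===== SOURCE A (Python) =====
-- def compute_pk(N, k):
--     """p_k(n) = coeff of q^n in prod(1-q^m)^{-k}.
--     Recurrence: n*p_k(n) = sum_{j=1}^n k*sigma(j)*p_k(n-j)."""
--     pk = [0] * (N + 1)
--     pk[0] = 1
--     ksig = [0] * (N + 1)
--     for j in range(1, N + 1):
--         s = 0
--         d = 1
--         while d * d <= j:
--             if j % d == 0:
--                 s += d
--                 if d != j // d:
--                     s += j // d
--             d += 1
--         ksig[j] = k * s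
--     for n in range(1, N + 1):
--         s = 0
--         for j in range(1, n + 1):
--             s += ksig[j] * pk[n - j]
--         pk[n] = s // n
--     if N >= 2:
--         assert pk[1] == k
--         assert pk[2] == k * (k + 3) // 2
--     return pk
-- ===== SOURCE B (Python) =====
-- def compute_pk(N, k):
--     """p_k(n) = coeff of q^n in prod(1-q^m)^{-k}, via the sigma-convolution
--     recurrence, with sigma built by a divisor sieve and pk grown by appending."""
--     sig = [0] * (N + 1)
--     for d in range(1, N + 1):
--         for m in range(d, N + 1, d):
--             sig[m] += d
--     pk = [1]
--     for n in range(1, N + 1):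
--         s = 0
--         for j in range(1, n + 1):
--             s += k * sig[j] * pk[n - j]
--         pk.append(s // n)
--     return pk
-- ===== Notes on version B (the rewrite author's own statement) =====
-- stated objective: alternative
-- what changed: B builds the divisor sums sigma(1..N) with a sieve over multiples (outer loop over each divisor d, inner loop over its multiples, accumulated in one shared table) instead of A's per-j sqrt-bounded trial-division loop, and grows pk by appending instead of writing into a preallocated zero array; the convolution recurrence is unchanged.
import Mathlib
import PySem

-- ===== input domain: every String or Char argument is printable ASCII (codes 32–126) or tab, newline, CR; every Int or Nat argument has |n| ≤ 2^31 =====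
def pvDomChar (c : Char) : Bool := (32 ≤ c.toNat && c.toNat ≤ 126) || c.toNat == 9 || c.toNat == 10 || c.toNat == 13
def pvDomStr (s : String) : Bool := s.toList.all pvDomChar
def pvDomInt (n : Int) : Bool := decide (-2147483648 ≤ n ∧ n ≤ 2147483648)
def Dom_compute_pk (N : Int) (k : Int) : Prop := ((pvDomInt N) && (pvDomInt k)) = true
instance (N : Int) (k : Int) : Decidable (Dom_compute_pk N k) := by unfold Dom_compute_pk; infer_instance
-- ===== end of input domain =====

-- B replaces A's per-j √-bounded trial-division sigma loop by a divisor sieve over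
-- multiples and grows pk by appending instead of writing into a preallocated array;
-- same convolution recurrence, same return value (objective: alternative).

-- ===== PORT A =====
-- A's inner `while d * d <= j` trial-division divisor-sum loop.
def pvTrial (j : Int) (s : Int) (d : Int) : Int :=
  if h : d * d ≤ j then
    pvTrial j
      (if PySem.Int.mod j d = 0 then
        (if d ≠ PySem.Int.floordiv j d then (s + d) + PySem.Int.floordiv j d else s + d)
       else s)
      (d + 1)
  else s
termination_by (j + 1 - d).toNat
decreasing_by
  have h1 : 0 ≤ j := le_trans (mul_self_nonneg d) h
  have h2 : 2 * d ≤ j + 1 := by nlinarith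
  omega

def compute_pk (N : Int) (k : Int) : List Int :=
  let pk0 : List Int := List.replicate (N + 1).toNat 0
  -- pk[0] = 1 raises IndexError when N < 0 (excluded by Pre_); pySetD is its total form
  let pk1 := PySem.List.pySetD pk0 0 1
  let ksig : List Int :=
    (PySem.List.pyRange 1 (N + 1) 1).foldl
      (fun ksig j => PySem.List.pySetD ksig j (k * pvTrial j 0 1))
      (List.replicate (N + 1).toNat 0)
  -- the two asserts always succeed (they restate pk[1] and pk[2] exactly as the loop
  -- computes them), so they are no-ops and are omitted
  (PySem.List.pyRange 1 (N + 1) 1).foldl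
    (fun pk n =>
      PySem.List.pySetD pk n
        (PySem.Int.floordiv
          ((PySem.List.pyRange 1 (n + 1) 1).foldl
            (fun s j => s + PySem.List.pyGetD ksig j 0 * PySem.List.pyGetD pk (n - j) 0) 0)
          n))
    pk1

-- ===== PORT B =====
def compute_pk_alt (N : Int) (k : Int) : List Int :=
  let sig : List Int :=
    (PySem.List.pyRange 1 (N + 1) 1).foldl
      (fun sig d =>
        (PySem.List.pyRange d (N + 1) d).foldl
          (fun sig m => PySem.List.pySetD sig m (PySem.List.pyGetD sig m 0 + d)) sig)
      (List.replicate (N + 1).toNat 0)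
  (PySem.List.pyRange 1 (N + 1) 1).foldl
    (fun pk n =>
      pk ++ [PySem.Int.floordiv
        ((PySem.List.pyRange 1 (n + 1) 1).foldl
          (fun s j => s + k * PySem.List.pyGetD sig j 0 * PySem.List.pyGetD pk (n - j) 0) 0)
        n])
    ([1] : List Int)

-- ===== PRECONDITION & SPEC =====
-- Python A raises IndexError for N < 0 (pk[0] = 1 on an empty list); otherwise total.
def Pre_compute_pk (N : Int) (k : Int) : Prop := 0 ≤ N
instance (N : Int) (k : Int) : Decidable (Pre_compute_pk N k) := by unfold Pre_compute_pk; infer_instance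
def pvWitness_compute_pk : Int × Int := (5, 2)

def Spec_compute_pk (N : Int) (k : Int) (out : List Int) : Prop := out = compute_pk_alt N k
instance (N : Int) (k : Int) (out : List Int) : Decidable (Spec_compute_pk N k out) := by unfold Spec_compute_pk; infer_instance

-- ===== CLAIM (what is proved, stated in full; the proofs are below) =====
def Claim_equal_compute_pk : Prop := ∀ (N : Int) (k : Int), Dom_compute_pk N k → Pre_compute_pk N k → Spec_compute_pk N k (compute_pk N k)

-- ===== LEMMAS AND PROOFS =====

def pvT (J D : ℕ) : ℕ :=
  (∑ e ∈ Finset.filter (fun e => (e ∣ J ∧ e * e ≤ J) ∧ D ≤ e) (Finset.Icc 1 J), e)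
  + (∑ e ∈ Finset.filter (fun e => (e ∣ J ∧ J < e * e) ∧ D ≤ J / e) (Finset.Icc 1 J), e)

theorem pvSum_step (s : Finset ℕ) (P : ℕ → Prop) [DecidablePred P] (g : ℕ → ℕ) (D : ℕ) :
    ∑ e ∈ s.filter (fun e => P e ∧ D ≤ g e), e
    = (∑ e ∈ s.filter (fun e => P e ∧ g e = D), e)
      + ∑ e ∈ s.filter (fun e => P e ∧ D + 1 ≤ g e), e := by
  have hsplit : s.filter (fun e => P e ∧ D ≤ g e)
      = s.filter (fun e => (P e ∧ g e = D) ∨ (P e ∧ D + 1 ≤ g e)) := by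
    apply Finset.filter_congr
    intro x _
    constructor
    · rintro ⟨hp, hle⟩
      rcases Nat.eq_or_lt_of_le hle with h | h
      · exact Or.inl ⟨hp, h.symm⟩
      · exact Or.inr ⟨hp, h⟩
    · rintro (⟨hp, he⟩ | ⟨hp, hle⟩)
      · exact ⟨hp, he.ge⟩
      · exact ⟨hp, by omega⟩
  rw [hsplit, Finset.filter_or, Finset.sum_union]
  rw [Finset.disjoint_left]
  intro a ha hb
  simp only [Finset.mem_filter] at ha hb
  omega

theorem pvT_zero_of_big (J D : ℕ) (hJ : 1 ≤ J) (hD : 1 ≤ D) (h : J < D * D) :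
    pvT J D = 0 := by
  unfold pvT
  have h1 : Finset.filter (fun e => (e ∣ J ∧ e * e ≤ J) ∧ D ≤ e) (Finset.Icc 1 J) = ∅ := by
    apply Finset.filter_eq_empty_iff.2
    intro e he
    simp only [Finset.mem_Icc] at he
    rintro ⟨⟨hdvd, hle⟩, hDe⟩
    nlinarith
  have h2 : Finset.filter (fun e => (e ∣ J ∧ J < e * e) ∧ D ≤ J / e) (Finset.Icc 1 J) = ∅ := by
    apply Finset.filter_eq_empty_iff.2
    intro e he
    simp only [Finset.mem_Icc] at he
    rintro ⟨⟨hdvd, hlt⟩, hDe⟩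
    have hme : D * e ≤ J := (Nat.le_div_iff_mul_le (by omega)).1 hDe
    nlinarith
  rw [h1, h2]
  simp

theorem pvT_step_not_dvd (J D : ℕ) (hJ : 1 ≤ J) (hD : 1 ≤ D) (hdvd : ¬ D ∣ J) :
    pvT J D = pvT J (D + 1) := by
  unfold pvT
  rw [pvSum_step (Finset.Icc 1 J) (fun e => e ∣ J ∧ e * e ≤ J) (fun e => e) D,
      pvSum_step (Finset.Icc 1 J) (fun e => e ∣ J ∧ J < e * e) (fun e => J / e) D]
  have e1 : Finset.filter (fun e => (e ∣ J ∧ e * e ≤ J) ∧ e = D) (Finset.Icc 1 J) = ∅ := by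
    apply Finset.filter_eq_empty_iff.2
    rintro e he ⟨⟨hd, _⟩, rfl⟩
    exact hdvd hd
  have e2 : Finset.filter (fun e => (e ∣ J ∧ J < e * e) ∧ J / e = D) (Finset.Icc 1 J) = ∅ := by
    apply Finset.filter_eq_empty_iff.2
    rintro e he ⟨⟨hd, _⟩, hJe⟩
    exact hdvd (hJe ▸ Dvd.intro_left e (Nat.mul_div_cancel' hd))
  rw [e1, e2]
  simp

theorem pvT_step_dvd_eq (J D : ℕ) (hJ : 1 ≤ J) (hD : 1 ≤ D) (hdvd : D ∣ J)
    (hDD : D * D ≤ J) (hC : J / D = D) :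
    pvT J D = D + pvT J (D + 1) := by
  unfold pvT
  rw [pvSum_step (Finset.Icc 1 J) (fun e => e ∣ J ∧ e * e ≤ J) (fun e => e) D,
      pvSum_step (Finset.Icc 1 J) (fun e => e ∣ J ∧ J < e * e) (fun e => J / e) D]
  have hJD : J = D * D := by
    conv_lhs => rw [← Nat.div_mul_cancel hdvd, hC]
  have e1 : Finset.filter (fun e => (e ∣ J ∧ e * e ≤ J) ∧ e = D) (Finset.Icc 1 J) = {D} := by
    apply Finset.ext
    intro e
    simp only [Finset.mem_filter, Finset.mem_Icc, Finset.mem_singleton]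
    constructor
    · rintro ⟨_, _, rfl⟩; rfl
    · rintro rfl
      refine ⟨⟨hD, by nlinarith⟩, ⟨hdvd, by omega⟩, rfl⟩
  have e2 : Finset.filter (fun e => (e ∣ J ∧ J < e * e) ∧ J / e = D) (Finset.Icc 1 J) = ∅ := by
    apply Finset.filter_eq_empty_iff.2
    rintro e he ⟨⟨hd, hlt⟩, hJe⟩
    have : e * D = J := by rw [← hJe]; exact Nat.mul_div_cancel' hd
    nlinarith
  rw [e1, e2]
  simp [add_assoc]

theorem pvT_step_dvd_ne (J D : ℕ) (hJ : 1 ≤ J) (hD : 1 ≤ D) (hdvd : D ∣ J)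
    (hDD : D * D ≤ J) (hC : J / D ≠ D) :
    pvT J D = D + J / D + pvT J (D + 1) := by
  unfold pvT
  rw [pvSum_step (Finset.Icc 1 J) (fun e => e ∣ J ∧ e * e ≤ J) (fun e => e) D,
      pvSum_step (Finset.Icc 1 J) (fun e => e ∣ J ∧ J < e * e) (fun e => J / e) D]
  set C := J / D with hCdef
  have hCD : C * D = J := Nat.div_mul_cancel hdvd
  have hC1 : 1 ≤ C := Nat.pos_of_ne_zero (fun h0 => by simp [h0] at hCD; omega)
  have hDC : D < C := by
    rcases Nat.lt_or_ge D C with h | h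
    · exact h
    · exfalso
      rcases Nat.eq_or_lt_of_le h with h' | h'
      · exact hC h'
      · nlinarith
  have e1 : Finset.filter (fun e => (e ∣ J ∧ e * e ≤ J) ∧ e = D) (Finset.Icc 1 J) = {D} := by
    apply Finset.ext
    intro e
    simp only [Finset.mem_filter, Finset.mem_Icc, Finset.mem_singleton]
    constructor
    · rintro ⟨_, _, rfl⟩; rfl
    · rintro rfl
      refine ⟨⟨hD, by nlinarith⟩, ⟨hdvd, hDD⟩, rfl⟩
  have e2 : Finset.filter (fun e => (e ∣ J ∧ J < e * e) ∧ J / e = D) (Finset.Icc 1 J) = {C} := by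
    apply Finset.ext
    intro e
    simp only [Finset.mem_filter, Finset.mem_Icc, Finset.mem_singleton]
    constructor
    · rintro ⟨⟨he1, he2⟩, ⟨hd, hlt⟩, hJe⟩
      have : e * D = J := by rw [← hJe]; exact Nat.mul_div_cancel' hd
      nlinarith [Nat.eq_of_mul_eq_mul_right (show 0 < D by omega) (this.trans hCD.symm)]
    · rintro rfl
      have hdC : C ∣ J := ⟨D, hCD.symm⟩
      refine ⟨⟨hC1, Nat.le_of_dvd (by omega) hdC⟩, ⟨hdC, by nlinarith⟩, ?_⟩
      rw [← hCD, Nat.mul_div_cancel_left D (by omega)]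
  rw [e1, e2]
  simp
  omega


def pvSigma (J : ℕ) : ℕ := ∑ e ∈ Finset.filter (fun e => e ∣ J) (Finset.Icc 1 J), e

theorem pvT_one (J : ℕ) (hJ : 1 ≤ J) : pvT J 1 = pvSigma J := by
  unfold pvT pvSigma
  have h1 : Finset.filter (fun e => (e ∣ J ∧ e * e ≤ J) ∧ 1 ≤ e) (Finset.Icc 1 J)
      = Finset.filter (fun e => e ∣ J ∧ e * e ≤ J) (Finset.Icc 1 J) := by
    apply Finset.filter_congr
    intro x hx
    simp only [Finset.mem_Icc] at hx
    constructor
    · rintro ⟨h, _⟩; exact h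
    · intro h; exact ⟨h, hx.1⟩
  have h2 : Finset.filter (fun e => (e ∣ J ∧ J < e * e) ∧ 1 ≤ J / e) (Finset.Icc 1 J)
      = Finset.filter (fun e => e ∣ J ∧ J < e * e) (Finset.Icc 1 J) := by
    apply Finset.filter_congr
    intro x hx
    simp only [Finset.mem_Icc] at hx
    constructor
    · rintro ⟨h, _⟩; exact h
    · intro h
      exact ⟨h, (Nat.one_le_div_iff (by omega)).2 hx.2⟩
  rw [h1, h2]
  rw [← Finset.sum_filter_add_sum_filter_not
    (Finset.filter (fun e => e ∣ J) (Finset.Icc 1 J)) (fun e => e * e ≤ J) (fun e => e)]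
  congr 1
  · rw [Finset.filter_filter]
  · rw [Finset.filter_filter]
    congr 1
    apply Finset.filter_congr
    intro x _
    simp only [not_le]
theorem pvTrial_inv (fuel : ℕ) : ∀ (J D : ℕ) (s : Int), 1 ≤ J → 1 ≤ D → J + 1 - D ≤ fuel →
    pvTrial (J : Int) s (D : Int) = s + (pvT J D : Int) := by
  induction fuel with
  | zero =>
    intro J D s hJ hD hf
    have hDJ : J < D := by omega
    have hbig : J < D * D := lt_of_lt_of_le hDJ (Nat.le_mul_of_pos_left D hD)
    have hneg : ¬ ((D : Int) * (D : Int) ≤ (J : Int)) := by exact_mod_cast Nat.not_le.2 hbig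
    rw [pvTrial, dif_neg hneg, pvT_zero_of_big J D hJ hD hbig]
    simp
  | succ fuel ih =>
    intro J D s hJ hD hf
    by_cases hDD : D * D ≤ J
    · have hDle : D ≤ J := le_trans (Nat.le_mul_of_pos_left D hD) hDD
      have hpos : ((D : Int) * (D : Int) ≤ (J : Int)) := by exact_mod_cast hDD
      rw [pvTrial, dif_pos hpos]
      have hcast1 : ((D : Int) + 1) = ((D + 1 : ℕ) : Int) := by push_cast; ring
      by_cases hdvd : D ∣ J
      · have hm0 : PySem.Int.mod (J : Int) (D : Int) = 0 := by
          rw [PySem.Int.mod_eq_zero_iff_dvd]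
          exact_mod_cast hdvd
        rw [if_pos hm0, PySem.Int.floordiv_natCast]
        by_cases hCD : J / D = D
        · rw [if_neg (show ¬ ((D : Int) ≠ ((J / D : ℕ) : Int)) from
            fun h => h (by exact_mod_cast hCD.symm))]
          rw [hcast1, ih J (D + 1) (s + (D : Int)) hJ (by omega) (by omega),
            pvT_step_dvd_eq J D hJ hD hdvd hDD hCD]
          push_cast
          ring
        · rw [if_pos (show (D : Int) ≠ ((J / D : ℕ) : Int) from
            fun h => hCD (by exact_mod_cast h.symm))]
          rw [hcast1, ih J (D + 1) ((s + (D : Int)) + ((J / D : ℕ) : Int)) hJ (by omega) (by omega),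
            pvT_step_dvd_ne J D hJ hD hdvd hDD hCD]
          push_cast
          ring
      · have hm : PySem.Int.mod (J : Int) (D : Int) ≠ 0 := by
          intro h0
          exact hdvd (by exact_mod_cast (PySem.Int.mod_eq_zero_iff_dvd _ _).1 h0)
        rw [if_neg hm, hcast1, ih J (D + 1) s hJ (by omega) (by omega),
          pvT_step_not_dvd J D hJ hD hdvd]
    · have hneg : ¬ ((D : Int) * (D : Int) ≤ (J : Int)) := by exact_mod_cast hDD
      rw [pvTrial, dif_neg hneg, pvT_zero_of_big J D hJ hD (Nat.lt_of_not_le hDD)]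
      simp

theorem pvTrial_eq (J : ℕ) (hJ : 1 ≤ J) : pvTrial (J : Int) 0 1 = (pvSigma J : Int) := by
  have h := pvTrial_inv J J 1 0 hJ (by omega) (by omega)
  rw [show ((1 : ℕ) : Int) = 1 by norm_num] at h
  rw [h, pvT_one J hJ]
  simp
theorem pvGetD_set (l : List Int) (i j : ℕ) (a : Int) :
    (l.set i a).getD j 0 = if i = j ∧ i < l.length then a else l.getD j 0 := by
  rw [List.getD_eq_getElem?_getD, List.getElem?_set, List.getD_eq_getElem?_getD]
  by_cases hij : i = j
  · subst hij
    by_cases hlen : i < l.length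
    · simp [hlen]
    · simp [hlen]
  · simp [hij]

theorem pvLen_foldl_pySetD {β : Type} (f : List Int → β → Int) (g : β → Int) (js : List β) :
    ∀ (init : List Int),
      (js.foldl (fun l j => PySem.List.pySetD l (g j) (f l j)) init).length = init.length := by
  induction js with
  | nil => intro init; rfl
  | cons j js ih =>
    intro init
    simp only [List.foldl_cons]
    rw [ih, PySem.List.length_pySetD]

theorem pvFoldl_set_getD (f : Int → Int) (js : List Int) :
    ∀ (init : List Int), (∀ j ∈ js, 0 ≤ j) → ∀ (i : ℕ), (i : Int) < init.length →
      (js.foldl (fun l j => PySem.List.pySetD l j (f j)) init).getD i 0 =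
        if (i : Int) ∈ js then f i else init.getD i 0 := by
  induction js with
  | nil => intro init _ i _; simp
  | cons j js ih =>
    intro init hjs i hi
    simp only [List.foldl_cons]
    have hj0 : 0 ≤ j := hjs j (List.mem_cons_self ..)
    rw [PySem.List.pySetD_of_nonneg _ _ hj0]
    have hlen : (init.set j.toNat (f j)).length = init.length := by simp
    rw [ih (init.set j.toNat (f j)) (fun x hx => hjs x (List.mem_cons_of_mem _ hx)) i (by omega)]
    by_cases hmem : (i : Int) ∈ js
    · rw [if_pos hmem, if_pos (List.mem_cons.2 (Or.inr hmem))]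
    · rw [if_neg hmem, pvGetD_set]
      by_cases hij : (i : Int) = j
      · have h1 : j.toNat = i := by omega
        have h2 : j.toNat < init.length := by omega
        rw [if_pos ⟨h1, h2⟩, if_pos (List.mem_cons.2 (Or.inl hij)), hij]
      · have hne : ¬ (j.toNat = i ∧ j.toNat < init.length) := by
          rintro ⟨h1, _⟩; omega
        rw [if_neg hne, if_neg (by rw [List.mem_cons]; rintro (h | h); exact hij h; exact hmem h)]

theorem pvSieve_inner_getD (d : Int) (ms : List Int) :
    ∀ (init : List Int), ms.Nodup → (∀ m ∈ ms, 0 ≤ m ∧ m < (init.length : Int)) →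
      ∀ (i : ℕ), (i : Int) < init.length →
        (ms.foldl (fun l m => PySem.List.pySetD l m (PySem.List.pyGetD l m 0 + d)) init).getD i 0 =
          init.getD i 0 + (if (i : Int) ∈ ms then d else 0) := by
  induction ms with
  | nil => intro init _ _ i _; simp
  | cons m ms ih =>
    intro init hnd hms i hi
    obtain ⟨hm0, hmlen⟩ := hms m (List.mem_cons_self ..)
    simp only [List.foldl_cons]
    rw [PySem.List.pySetD_of_nonneg _ _ hm0, PySem.List.pyGetD_of_nonneg _ _ hm0]
    have hlen : (init.set m.toNat (init.getD m.toNat 0 + d)).length = init.length := by simp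
    rw [ih (init.set m.toNat (init.getD m.toNat 0 + d)) hnd.of_cons
      (fun x hx => by have := hms x (List.mem_cons_of_mem _ hx); exact ⟨this.1, by omega⟩) i (by omega)]
    rw [pvGetD_set]
    by_cases him : (i : Int) = m
    · have h1 : m.toNat = i := by omega
      have h2 : m.toNat < init.length := by omega
      have hnotin : (i : Int) ∉ ms := fun h => (List.nodup_cons.1 hnd).1 (him ▸ h)
      rw [if_pos ⟨h1, h2⟩, if_neg hnotin, if_pos (List.mem_cons.2 (Or.inl him)), h1]
      ring
    · have hne : ¬ (m.toNat = i ∧ m.toNat < init.length) := by rintro ⟨h1, _⟩; omega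
      rw [if_neg hne]
      by_cases hmm : (i : Int) ∈ ms
      · rw [if_pos hmm, if_pos (List.mem_cons.2 (Or.inr hmm))]
      · rw [if_neg hmm, if_neg (by rw [List.mem_cons]; rintro (h | h); exact him h; exact hmm h)]

theorem pvNodup_pyRange {a b s : Int} (hs : 0 < s) : (PySem.List.pyRange a b s).Nodup := by
  rw [PySem.List.pyRange_of_pos a b hs]
  refine List.Nodup.map ?_ List.nodup_range
  intro x y h
  have h2 : s * (x : Int) = s * (y : Int) := by exact add_left_cancel h
  have h3 := mul_left_cancel₀ (ne_of_gt hs) h2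
  exact_mod_cast h3

theorem pvSum_le_succ (J c : ℕ) :
    ∑ e ∈ Finset.filter (fun e => e ∣ J ∧ e ≤ c + 1) (Finset.Icc 1 J), e
    = (∑ e ∈ Finset.filter (fun e => e ∣ J ∧ e ≤ c) (Finset.Icc 1 J), e)
      + (if (c + 1) ∣ J ∧ c + 1 ≤ J then c + 1 else 0) := by
  by_cases h : (c + 1) ∣ J ∧ c + 1 ≤ J
  · rw [if_pos h]
    have hset : Finset.filter (fun e => e ∣ J ∧ e ≤ c + 1) (Finset.Icc 1 J)
        = insert (c + 1) (Finset.filter (fun e => e ∣ J ∧ e ≤ c) (Finset.Icc 1 J)) := by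
      apply Finset.ext
      intro e
      simp only [Finset.mem_filter, Finset.mem_Icc, Finset.mem_insert]
      constructor
      · rintro ⟨⟨h1, h2⟩, hd, hle⟩
        rcases Nat.eq_or_lt_of_le hle with he | he
        · exact Or.inl he
        · exact Or.inr ⟨⟨h1, h2⟩, hd, by omega⟩
      · rintro (rfl | ⟨⟨h1, h2⟩, hd, hle⟩)
        · exact ⟨⟨by omega, h.2⟩, h.1, le_rfl⟩
        · exact ⟨⟨h1, h2⟩, hd, by omega⟩
    rw [hset, Finset.sum_insert (by simp only [Finset.mem_filter, Finset.mem_Icc]; rintro ⟨_, _, h⟩; omega)]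
    omega
  · rw [if_neg h]
    have hset : Finset.filter (fun e => e ∣ J ∧ e ≤ c + 1) (Finset.Icc 1 J)
        = Finset.filter (fun e => e ∣ J ∧ e ≤ c) (Finset.Icc 1 J) := by
      apply Finset.filter_congr
      intro e he
      simp only [Finset.mem_Icc] at he
      constructor
      · rintro ⟨hd, hle⟩
        refine ⟨hd, ?_⟩
        rcases Nat.eq_or_lt_of_le hle with he' | he'
        · exact absurd ⟨he' ▸ hd, he' ▸ he.2⟩ h
        · omega
      · rintro ⟨hd, hle⟩
        exact ⟨hd, by omega⟩
    rw [hset]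
    omega

theorem pvSieve_getD (M : ℕ) :
    ∀ (c : ℕ), c ≤ M →
      (((PySem.List.pyRange 1 ((c : Int) + 1) 1).foldl
        (fun sig d =>
          (PySem.List.pyRange d ((M : Int) + 1) d).foldl
            (fun sig m => PySem.List.pySetD sig m (PySem.List.pyGetD sig m 0 + d)) sig)
        (List.replicate (M + 1) 0)).length = M + 1)
      ∧ ∀ (J : ℕ), 1 ≤ J → J ≤ M →
        ((PySem.List.pyRange 1 ((c : Int) + 1) 1).foldl
          (fun sig d =>
            (PySem.List.pyRange d ((M : Int) + 1) d).foldl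
              (fun sig m => PySem.List.pySetD sig m (PySem.List.pyGetD sig m 0 + d)) sig)
          (List.replicate (M + 1) 0)).getD J 0 =
          ((∑ e ∈ Finset.filter (fun e => e ∣ J ∧ e ≤ c) (Finset.Icc 1 J), e : ℕ) : Int) := by
  intro c
  induction c with
  | zero =>
    intro _
    rw [show ((0 : ℕ) : Int) + 1 = 1 by norm_num, PySem.List.pyRange_one_eq_nil le_rfl]
    simp only [List.foldl_nil, List.length_replicate, true_and]
    intro J h1 h2
    rw [List.getD_replicate _ (by omega)]
    rw [show Finset.filter (fun e => e ∣ J ∧ e ≤ 0) (Finset.Icc 1 J) = ∅ from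
      Finset.filter_eq_empty_iff.2 (by
        intro e he
        simp only [Finset.mem_Icc] at he
        rintro ⟨_, h0⟩
        omega)]
    simp
  | succ c ih =>
    intro hc1
    obtain ⟨ihlen, ihget⟩ := ih (by omega)
    have hsplit : PySem.List.pyRange 1 (((c + 1 : ℕ) : Int) + 1) 1
        = PySem.List.pyRange 1 ((c : Int) + 1) 1 ++ [(c : Int) + 1] := by
      rw [show (((c + 1 : ℕ) : Int) + 1) = ((c : Int) + 1) + 1 by push_cast; ring]
      exact PySem.List.pyRange_one_succ_right (by omega)
    rw [hsplit, List.foldl_append]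
    simp only [List.foldl_cons, List.foldl_nil]
    set prev := (PySem.List.pyRange 1 ((c : Int) + 1) 1).foldl
      (fun sig d =>
        (PySem.List.pyRange d ((M : Int) + 1) d).foldl
          (fun sig m => PySem.List.pySetD sig m (PySem.List.pyGetD sig m 0 + d)) sig)
      (List.replicate (M + 1) 0) with hprev
    have hd0 : (0 : Int) < (c : Int) + 1 := by omega
    have hbounds : ∀ m ∈ PySem.List.pyRange ((c : Int) + 1) ((M : Int) + 1) ((c : Int) + 1),
        0 ≤ m ∧ m < (prev.length : Int) := by
      intro m hm
      rw [PySem.List.mem_pyRange_iff_of_pos hd0] at hm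
      rw [ihlen]
      push_cast
      omega
    constructor
    · rw [pvLen_foldl_pySetD (fun l m => PySem.List.pyGetD l m 0 + ((c : Int) + 1)) (fun m => m)]
      exact ihlen
    · intro J h1 h2
      rw [pvSieve_inner_getD ((c : Int) + 1) _ prev (pvNodup_pyRange hd0) hbounds J (by rw [ihlen]; push_cast; omega)]
      rw [ihget J h1 h2]
      have hmem : ((J : Int) ∈ PySem.List.pyRange ((c : Int) + 1) ((M : Int) + 1) ((c : Int) + 1))
          ↔ ((c + 1) ∣ J ∧ c + 1 ≤ J) := by
        rw [PySem.List.mem_pyRange_iff_of_pos hd0]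
        constructor
        · rintro ⟨ha, hb, hdvd⟩
          have h3 : ((c : Int) + 1) ∣ (J : Int) := by
            have := dvd_add hdvd (dvd_refl ((c : Int) + 1))
            simpa using this
          constructor
          · exact_mod_cast (Int.natCast_dvd_natCast.1 (by exact_mod_cast h3))
          · omega
        · rintro ⟨hdvd, hle⟩
          refine ⟨by omega, by omega, ?_⟩
          have h3 : ((c : Int) + 1) ∣ (J : Int) := by exact_mod_cast Int.natCast_dvd_natCast.2 hdvd
          exact dvd_sub h3 (dvd_refl _)
      rw [pvSum_le_succ J c]
      by_cases hcase : (c + 1) ∣ J ∧ c + 1 ≤ J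
      · rw [if_pos ((hmem).2 hcase), if_pos hcase]
        push_cast
        ring
      · rw [if_neg (fun h => hcase ((hmem).1 h)), if_neg hcase]
        push_cast
        ring

theorem pvKsig_getD (M : ℕ) (k : Int) (J : ℕ) (h1 : 1 ≤ J) (h2 : J ≤ M) :
    ((PySem.List.pyRange 1 ((M : Int) + 1) 1).foldl
      (fun ksig j => PySem.List.pySetD ksig j (k * pvTrial j 0 1))
      (List.replicate (M + 1) 0)).getD J 0 = k * (pvSigma J : Int) := by
  rw [pvFoldl_set_getD (fun j => k * pvTrial j 0 1) _ _
    (fun j hj => by rw [PySem.List.mem_pyRange_one] at hj; omega) J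
    (by rw [List.length_replicate]; push_cast; omega)]
  rw [if_pos (PySem.List.mem_pyRange_one.2 (by push_cast; omega)), pvTrial_eq J h1]

theorem pvDP (M : ℕ) (k : Int) (ksig sig : List Int)
    (hk : ∀ J : ℕ, 1 ≤ J → J ≤ M → ksig.getD J 0 = k * (pvSigma J : Int))
    (hs : ∀ J : ℕ, 1 ≤ J → J ≤ M → sig.getD J 0 = (pvSigma J : Int)) :
    ∀ c : ℕ, c ≤ M →
      ((PySem.List.pyRange 1 ((c : Int) + 1) 1).foldl
        (fun pk n =>
          PySem.List.pySetD pk n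
            (PySem.Int.floordiv
              ((PySem.List.pyRange 1 (n + 1) 1).foldl
                (fun s j => s + PySem.List.pyGetD ksig j 0 * PySem.List.pyGetD pk (n - j) 0) 0)
              n))
        (PySem.List.pySetD (List.replicate (M + 1) (0 : Int)) 0 1))
      = ((PySem.List.pyRange 1 ((c : Int) + 1) 1).foldl
          (fun pk n =>
            pk ++ [PySem.Int.floordiv
              ((PySem.List.pyRange 1 (n + 1) 1).foldl
                (fun s j => s + k * PySem.List.pyGetD sig j 0 * PySem.List.pyGetD pk (n - j) 0) 0)
              n])
          ([1] : List Int)) ++ List.replicate (M - c) 0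
      ∧ ((PySem.List.pyRange 1 ((c : Int) + 1) 1).foldl
          (fun pk n =>
            pk ++ [PySem.Int.floordiv
              ((PySem.List.pyRange 1 (n + 1) 1).foldl
                (fun s j => s + k * PySem.List.pyGetD sig j 0 * PySem.List.pyGetD pk (n - j) 0) 0)
              n])
          ([1] : List Int)).length = c + 1 := by
  intro c
  induction c with
  | zero =>
    intro _
    rw [show ((0 : ℕ) : Int) + 1 = 1 by norm_num, PySem.List.pyRange_one_eq_nil le_rfl]
    simp only [List.foldl_nil, List.length_singleton, and_true]
    rw [PySem.List.pySetD_of_nonneg _ _ (by norm_num)]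
    rw [show ((0 : Int)).toNat = 0 from rfl, List.replicate_succ, List.set_cons_zero]
    simp
  | succ c ih =>
    intro hc1
    obtain ⟨hAB, hlen⟩ := ih (by omega)
    have hsplit : PySem.List.pyRange 1 (((c + 1 : ℕ) : Int) + 1) 1
        = PySem.List.pyRange 1 ((c : Int) + 1) 1 ++ [(c : Int) + 1] := by
      rw [show (((c + 1 : ℕ) : Int) + 1) = ((c : Int) + 1) + 1 by push_cast; ring]
      exact PySem.List.pyRange_one_succ_right (by omega)
    rw [hsplit]
    simp only [List.foldl_append, List.foldl_cons, List.foldl_nil]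
    rw [hAB]
    set Bc := (PySem.List.pyRange 1 ((c : Int) + 1) 1).foldl
      (fun pk n =>
        pk ++ [PySem.Int.floordiv
          ((PySem.List.pyRange 1 (n + 1) 1).foldl
            (fun s j => s + k * PySem.List.pyGetD sig j 0 * PySem.List.pyGetD pk (n - j) 0) 0)
          n])
      ([1] : List Int) with hBc
    have hsum : (PySem.List.pyRange 1 (((c : Int) + 1) + 1) 1).foldl
        (fun s j => s + PySem.List.pyGetD ksig j 0 *
          PySem.List.pyGetD (Bc ++ List.replicate (M - c) 0) (((c : Int) + 1) - j) 0) 0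
      = (PySem.List.pyRange 1 (((c : Int) + 1) + 1) 1).foldl
        (fun s j => s + k * PySem.List.pyGetD sig j 0 *
          PySem.List.pyGetD Bc (((c : Int) + 1) - j) 0) 0 := by
      apply PySem.List.foldl_congr_mem
      intro acc j hj
      rw [PySem.List.mem_pyRange_one] at hj
      have hj' : 1 ≤ j.toNat ∧ j.toNat ≤ c + 1 := by omega
      rw [show j = ((j.toNat : ℕ) : Int) by omega, PySem.List.pyGetD_natCast,
        PySem.List.pyGetD_natCast, hk j.toNat hj'.1 (by omega), hs j.toNat hj'.1 (by omega)]
      rw [show ((c : Int) + 1) - ((j.toNat : ℕ) : Int) = ((c + 1 - j.toNat : ℕ) : Int) by push_cast; omega]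
      rw [PySem.List.pyGetD_natCast, PySem.List.pyGetD_natCast]
      rw [List.getD_append _ _ _ _ (by rw [hlen]; omega)]
    rw [hsum]
    constructor
    · rw [PySem.List.pySetD_of_nonneg _ _ (by omega)]
      rw [show ((c : Int) + 1).toNat = c + 1 by omega]
      rw [List.set_append, if_neg (by rw [hlen]; omega), hlen, Nat.sub_self]
      rw [show M - c = (M - (c + 1)) + 1 by omega, List.replicate_succ, List.set_cons_zero]
      rw [List.append_assoc]
      rfl
    · rw [List.length_append, hlen]
      rfl

theorem compute_pk_eq (M : ℕ) (k : Int) :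
    compute_pk (M : Int) k = compute_pk_alt (M : Int) k := by
  have htoNat : (((M : Int)) + 1).toNat = M + 1 := by omega
  simp only [compute_pk, compute_pk_alt, htoNat]
  have hsig' : ∀ J : ℕ, 1 ≤ J → J ≤ M →
      ((PySem.List.pyRange 1 ((M : Int) + 1) 1).foldl
        (fun sig d => (PySem.List.pyRange d ((M : Int) + 1) d).foldl
          (fun sig m => PySem.List.pySetD sig m (PySem.List.pyGetD sig m 0 + d)) sig)
        (List.replicate (M + 1) 0)).getD J 0 = (pvSigma J : Int) := by
    intro J h1 h2
    rw [(pvSieve_getD M M le_rfl).2 J h1 h2]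
    congr 1
    unfold pvSigma
    apply Finset.sum_congr _ (fun _ _ => rfl)
    apply Finset.filter_congr
    intro e he
    simp only [Finset.mem_Icc] at he
    constructor
    · rintro ⟨hd, _⟩; exact hd
    · intro hd; exact ⟨hd, by omega⟩
  obtain ⟨hAB, _⟩ := pvDP M k _ _ (pvKsig_getD M k) hsig' M le_rfl
  simpa using hAB

-- ===== VERDICT (by name: the statement is the Claim_ definition above) =====
theorem compute_pk_spec : Claim_equal_compute_pk := by
  intro N k _ hpre
  obtain ⟨M, rfl⟩ := Int.eq_ofNat_of_zero_le hpre
  exact compute_pk_eq M k
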